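-- pv_equiv track=rewrite | github.com/eliottcassidy2000/math | 04-computation/circulant_scalar_m_conjecture.py | all_circulant_gen_sets
-- ===== SOURCE A (Python) =====
-- def all_circulant_gen_sets(n):
--     """Generate all valid generating sets for circulant tournaments on Z/nZ."""
--     half = list(range(1, (n+1)//2))  # {1, 2, ..., (n-1)/2}
--     gen_sets = []
--     for mask in range(1 << len(half)):
--         gs = set()
--         for k, d in enumerate(half):
--             if mask & (1 << k):
--                 gs.add(d)
--             else:
--                 gs.add(n - d)
--         gen_sets.append(frozenset(gs))
--     return gen_sets
-- ===== SOURCE B (Python) =====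
-- def all_circulant_gen_sets(n):
--     """Generate all valid generating sets for circulant tournaments on Z/nZ."""
--     half = list(range(1, (n+1)//2))
--
--     def build(ds):
--         if not ds:
--             return [[]]
--         d = ds[0]
--         return [[c] + t for t in build(ds[1:]) for c in (n - d, d)]
--
--     return [frozenset(t) for t in build(half)]
-- ===== Notes on version B (the rewrite author's own statement) =====
-- stated objective: alternative
-- what changed: Replaced the bitmask loop (iterate mask in range(2^len) and test each bit) by a structural recursion over the half-range that builds the choice lists by prepending n-d or d to each recursively built tail, yielding the same enumeration order without any bit arithmetic.
import Mathlib
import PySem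

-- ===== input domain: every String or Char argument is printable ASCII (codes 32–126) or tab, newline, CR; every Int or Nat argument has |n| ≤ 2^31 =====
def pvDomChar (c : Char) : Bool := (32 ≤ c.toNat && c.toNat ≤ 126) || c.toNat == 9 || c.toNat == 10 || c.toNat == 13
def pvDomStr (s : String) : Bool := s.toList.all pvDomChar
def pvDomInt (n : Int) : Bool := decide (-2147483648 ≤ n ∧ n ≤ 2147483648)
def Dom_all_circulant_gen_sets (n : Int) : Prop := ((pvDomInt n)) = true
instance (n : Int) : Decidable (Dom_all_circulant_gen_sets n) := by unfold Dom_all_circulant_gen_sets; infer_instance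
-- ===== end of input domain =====

-- B replaces A's bitmask loop by a structural recursion over the half-range (per-element
-- choice n-d vs d), a plainer decomposition of the same enumeration (objective: alternative).

-- ===== PORT A =====
-- literal port of A: bitmask enumeration; 'mask & (1 << k)' is PySem.Int.band / '<<<'
-- (the enumerate index kd.1 is ≥ 0, so '.toNat' on it is exact)
def all_circulant_gen_sets (n : Int) : List (List Int) :=
  let half : List Int := PySem.List.pyRange 1 (PySem.Int.floordiv (n + 1) 2) 1
  (PySem.List.pyRange 0 ((1 : Int) <<< half.length) 1).foldl
    (fun (gen_sets : List (List Int)) (mask : Int) =>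
      let gs : PySem.Set Int :=
        (PySem.List.enumerate half).foldl
          (fun (gs : PySem.Set Int) (kd : Int × Int) =>
            if PySem.Int.band mask ((1 : Int) <<< kd.1.toNat) ≠ 0 then gs.add kd.2
            else gs.add (n - kd.2))
          PySem.Set.empty
      gen_sets ++ [gs]) []

-- ===== PORT B =====
-- B's recursive helper 'build'
def pvBuild (n : Int) : List Int → List (List Int)
  | [] => [[]]
  | d :: rest => (pvBuild n rest).flatMap (fun t => [(n - d) :: t, d :: t])

def all_circulant_gen_sets_alt (n : Int) : List (List Int) :=
  let half : List Int := PySem.List.pyRange 1 (PySem.Int.floordiv (n + 1) 2) 1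
  (pvBuild n half).map (fun t => PySem.Set.ofList t)

-- ===== PRECONDITION & SPEC =====
def Spec_all_circulant_gen_sets (n : Int) (out : List (List Int)) : Prop := out = all_circulant_gen_sets_alt n
instance (n : Int) (out : List (List Int)) : Decidable (Spec_all_circulant_gen_sets n out) := by unfold Spec_all_circulant_gen_sets; infer_instance

-- ===== CLAIM (what is proved, stated in full; the proofs are below) =====
def Claim_equal_all_circulant_gen_sets : Prop := ∀ (n : Int), Dom_all_circulant_gen_sets n → Spec_all_circulant_gen_sets n (all_circulant_gen_sets n)

-- ===== LEMMAS AND PROOFS =====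

-- the per-mask choice list: entry k is ds[k] if bit k of m is set, else n - ds[k]
def pvPick (n : Int) (m : Nat) : List Int → List Int
  | [] => []
  | d :: rest => (if m % 2 = 1 then d else n - d) :: pvPick n (m / 2) rest

theorem pv_foldl_append {α β : Type} (f : α → β) :
    ∀ (l : List α) (acc : List β),
      l.foldl (fun a x => a ++ [f x]) acc = acc ++ l.map f := by
  intro l
  induction l with
  | nil => simp
  | cons x xs ih => intro acc; simp [List.foldl_cons, ih]

theorem pv_mem_pick {n : Int} :
    ∀ (ds : List Int) (m : Nat) (x : Int), x ∈ pvPick n m ds → ∃ d ∈ ds, x = d ∨ x = n - d := by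
  intro ds
  induction ds with
  | nil => simp [pvPick]
  | cons d rest ih =>
    intro m x hx
    simp only [pvPick, List.mem_cons] at hx
    rcases hx with hx | hx
    · exact ⟨d, List.mem_cons_self, by split_ifs at hx <;> simp [hx]⟩
    · obtain ⟨d', hd', h⟩ := ih (m / 2) x hx
      exact ⟨d', List.mem_cons_of_mem _ hd', h⟩

theorem pv_pick_nodup {n : Int} :
    ∀ (ds : List Int), ds.Pairwise (· < ·) → (∀ x ∈ ds, 0 < x ∧ 2 * x < n) →
      ∀ m : Nat, (pvPick n m ds).Nodup := by
  intro ds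
  induction ds with
  | nil => intro _ _ m; simp [pvPick]
  | cons d rest ih =>
    intro hp hb m
    rw [List.pairwise_cons] at hp
    refine List.nodup_cons.mpr ⟨?_, ih hp.2 (fun x hx => hb x (List.mem_cons_of_mem _ hx)) (m / 2)⟩
    intro hmem
    obtain ⟨d', hd', h⟩ := pv_mem_pick _ _ _ hmem
    have h1 := hp.1 d' hd'
    have h2 := hb d' (List.mem_cons_of_mem _ hd')
    have h3 := hb d List.mem_cons_self
    split_ifs at h <;> rcases h with h | h <;> omega

theorem pv_band_bit (m j : Nat) :
    (PySem.Int.band (m : Int) ((1 : Int) <<< j) ≠ 0) ↔ ((m >>> j) % 2 = 1) := by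
  have hsh : ((1 : Int) <<< j) = ((1 <<< j : Nat) : Int) := by
    simp [Int.shiftLeft_eq, Nat.shiftLeft_eq]
  rw [hsh, PySem.Int.band_natCast]
  have : ((m &&& 1 <<< j : Nat) : Int) ≠ 0 ↔ (m &&& 2 ^ j ≠ 0) := by
    rw [Nat.shiftLeft_eq, one_mul]
    exact Int.natCast_ne_zero
  rw [this, Nat.and_two_pow, Nat.shiftRight_eq_div_pow, Nat.testBit_eq_decide_div_mod_eq]
  by_cases h : m / 2 ^ j % 2 = 1 <;> simp [h]

theorem pv_enum_fold (n : Int) (m : Nat) :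
    ∀ (ds : List Int) (j : Nat) (s : PySem.Set Int),
      (PySem.List.enumerate ds (j : Int)).foldl
        (fun (gs : PySem.Set Int) (kd : Int × Int) =>
          if PySem.Int.band (m : Int) ((1 : Int) <<< kd.1.toNat) ≠ 0 then gs.add kd.2
          else gs.add (n - kd.2)) s
      = (pvPick n (m >>> j) ds).foldl PySem.Set.add s := by
  intro ds
  induction ds with
  | nil => intro j s; simp [PySem.List.enumerate_nil, pvPick]
  | cons d rest ih =>
    intro j s
    rw [PySem.List.enumerate_cons]
    simp only [List.foldl_cons, pvPick]
    have hnext : ((j : Int) + 1) = ((j + 1 : Nat) : Int) := by push_cast; ring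
    rw [hnext, ih (j + 1)]
    have hdiv : m >>> (j + 1) = (m >>> j) / 2 := Nat.shiftRight_succ m j
    have htn : ((j : Int)).toNat = j := Int.toNat_natCast j
    rw [hdiv, htn]
    by_cases hb : (m >>> j) % 2 = 1
    · rw [if_pos ((pv_band_bit m j).mpr hb), if_pos hb]
    · rw [if_neg (fun h => hb ((pv_band_bit m j).mp h)), if_neg hb]

theorem pv_range_double : ∀ (N : Nat),
    List.range (2 * N) = (List.range N).flatMap (fun q => [2 * q, 2 * q + 1]) := by
  intro N
  induction N with
  | zero => simp
  | succ k ih =>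
    have h2 : 2 * (k + 1) = (2 * k + 1) + 1 := by ring
    rw [h2, List.range_succ, List.range_succ, List.range_succ, ih, List.flatMap_append]
    simp

theorem pv_map_range_pick (n : Int) :
    ∀ (ds : List Int),
      (List.range (2 ^ ds.length)).map (fun m => pvPick n m ds) = pvBuild n ds := by
  intro ds
  induction ds with
  | nil =>
    have : (2 : Nat) ^ ([] : List Int).length = 1 := by simp
    rw [this]
    simp [List.range_succ, pvPick, pvBuild]
  | cons d rest ih =>
    have hlen : (2 : Nat) ^ (d :: rest).length = 2 * 2 ^ rest.length := by
      simp [List.length_cons, pow_succ]; ring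
    rw [pvBuild, ← ih, hlen, pv_range_double, List.map_flatMap, List.flatMap_map]
    congr 1
    funext q
    have e0 : (2 * q) % 2 = 0 := by omega
    have e1 : (2 * q) / 2 = q := by omega
    have e2 : (2 * q + 1) % 2 = 1 := by omega
    have e3 : (2 * q + 1) / 2 = q := by omega
    simp [pvPick, e0, e1, e2, e3]

theorem pv_fold_add_nodup (xs : List Int) (h : xs.Nodup) :
    xs.foldl PySem.Set.add PySem.Set.empty = xs := by
  have h1 : xs.foldl PySem.Set.add PySem.Set.empty = PySem.Set.ofList xs := rfl
  rw [h1]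
  exact PySem.Set.ofList_eq_self_of_nodup xs h

theorem pv_half_bounds (n x : Int)
    (hx : x ∈ PySem.List.pyRange 1 (PySem.Int.floordiv (n + 1) 2) 1) : 0 < x ∧ 2 * x < n := by
  rw [PySem.List.mem_pyRange_one] at hx
  have hfd : (PySem.Int.floordiv (n + 1) 2) * 2 ≤ n + 1 ∧
      n + 1 < (PySem.Int.floordiv (n + 1) 2 + 1) * 2 :=
    (PySem.Int.floordiv_eq_iff_of_pos (by omega)).mp rfl
  omega

-- A's result, per mask list
theorem pv_A_eq_map (n : Int) :
    all_circulant_gen_sets n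
      = (List.range (2 ^ (PySem.List.pyRange 1 (PySem.Int.floordiv (n + 1) 2) 1).length)).map
          (fun m => pvPick n m (PySem.List.pyRange 1 (PySem.Int.floordiv (n + 1) 2) 1)) := by
  unfold all_circulant_gen_sets
  set half := PySem.List.pyRange 1 (PySem.Int.floordiv (n + 1) 2) 1 with hhalf
  simp only []
  rw [pv_foldl_append]
  have hmask : PySem.List.pyRange 0 ((1 : Int) <<< half.length) 1
      = (List.range (2 ^ half.length)).map (fun k : Nat => ((k : Int))) := by
    rw [PySem.List.pyRange_one]
    have : (((1 : Int) <<< half.length) - 0).toNat = 2 ^ half.length := by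
      rw [Int.shiftLeft_eq]
      have h2 : ((1 : Int) * 2 ^ half.length - 0) = ((2 ^ half.length : Nat) : Int) := by
        push_cast; ring
      rw [h2, Int.toNat_natCast]
    rw [this]
    simp
  rw [hmask, List.map_map, List.nil_append]
  apply List.map_congr_left
  intro m _
  simp only [Function.comp]
  have := pv_enum_fold n m half 0 PySem.Set.empty
  rw [Nat.shiftRight_zero] at this
  simp only [Nat.cast_zero] at this
  rw [this, pv_fold_add_nodup]
  exact pv_pick_nodup half (PySem.List.pairwise_lt_pyRange_one 1 _)
    (fun x hx => pv_half_bounds n x hx) m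

-- ===== VERDICT (by name: the statement is the Claim_ definition above) =====
theorem all_circulant_gen_sets_spec : Claim_equal_all_circulant_gen_sets := by
  intro n _
  unfold Spec_all_circulant_gen_sets all_circulant_gen_sets_alt
  simp only []
  set half := PySem.List.pyRange 1 (PySem.Int.floordiv (n + 1) 2) 1 with hhalf
  rw [pv_A_eq_map, ← pv_map_range_pick n half, List.map_map]
  apply List.map_congr_left
  intro m _
  simp only [Function.comp]
  exact (PySem.Set.ofList_eq_self_of_nodup _
    (pv_pick_nodup half (PySem.List.pairwise_lt_pyRange_one 1 _)
      (fun x hx => pv_half_bounds n x hx) m)).symm
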